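-- pv_equiv track=rewrite | github.com/jaysoo/dot-ai-config | dot_ai/2025-06-09/mcp-ai-content-server/mcp_ai_content_server/semantic_search.py | _extract_markdown_summary
-- ===== SOURCE A (Python) =====
-- def _extract_markdown_summary(content: str) -> str:
--     """Extract key sections from markdown content.
--
--     Args:
--         content: Markdown content
--
--     Returns:
--         Summarized content
--     """
--     lines = content.split('\n')
--     summary_parts = []
--
--     current_section = []
--     in_code_block = False
--
--     for line in lines:
--         line = line.strip()
--
--         # Track code blocks
--         if line.startswith('```'):
--             in_code_block = not in_code_block
--             continue
--
--         if in_code_block: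
--             continue
--
--         # Headers are important
--         if line.startswith('#'):
--             if current_section:
--                 summary_parts.extend(current_section[:3])  # First 3 lines of previous section
--             current_section = [line]
--         elif line and not line.startswith('*') and not line.startswith('-'):
--             # Regular content lines (skip list items for brevity)
--             current_section.append(line)
--
--     # Add remaining section
--     if current_section:
--         summary_parts.extend(current_section[:3])
--
--     return " ".join(summary_parts)
-- ===== SOURCE B (Python) =====
-- def _classify(content):
--     """Pass 1: strip lines, drop code blocks, tag each kept line as header/content."""
--     tokens = []
--     in_code_block = False
--     for raw in content.split('\n'):
--         line = raw.strip()
--         if line.startswith('```'):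
--             in_code_block = not in_code_block
--         elif in_code_block:
--             pass
--         elif line.startswith('#'):
--             tokens.append((True, line))
--         elif line and not line.startswith('*') and not line.startswith('-'):
--             tokens.append((False, line))
--     return tokens
--
--
-- def _split_sections(tokens):
--     """Pass 2: group tokens into sections; each header begins a new section."""
--     sections = []
--     current = []
--     for is_header, text in tokens:
--         if is_header:
--             sections.append(current)
--             current = [text]
--         else:
--             current.append(text)
--     sections.append(current)
--     return sections
--
--
-- def _extract_markdown_summary(content: str) -> str:
--     sections = _split_sections(_classify(content))
--     return " ".join(t for sec in sections for t in sec[:3])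
-- ===== Notes on version B (the rewrite author's own statement) =====
-- stated objective: alternative
-- what changed: Replaces A's single accumulator loop that flushes current_section[:3] at each header with a three-stage pipeline: classify stripped non-code lines into header/content tokens, split the token stream into sections at headers, then take each section's first 3 lines, flatten and join.
import Mathlib
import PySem

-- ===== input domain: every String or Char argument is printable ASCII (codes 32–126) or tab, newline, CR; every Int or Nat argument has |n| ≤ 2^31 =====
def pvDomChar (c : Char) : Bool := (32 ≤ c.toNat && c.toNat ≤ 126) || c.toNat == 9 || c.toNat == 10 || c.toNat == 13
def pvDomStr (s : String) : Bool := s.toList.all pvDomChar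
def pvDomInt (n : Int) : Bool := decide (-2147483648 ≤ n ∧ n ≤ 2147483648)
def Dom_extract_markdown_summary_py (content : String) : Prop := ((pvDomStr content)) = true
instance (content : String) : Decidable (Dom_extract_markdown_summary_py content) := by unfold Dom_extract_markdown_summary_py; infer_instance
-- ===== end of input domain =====

-- B: re-decomposes A's single flush-accumulator loop into three passes (classify tokens,
-- split into sections, take-3 + flatten + join); objective: alternative, same cost.


-- ===== PORT A =====
-- loop body of A's single for-loop (state: summary_parts, current_section, in_code_block)
def pvStepA (st : List String × List String × Bool) (rawLine : String) : List String × List String × Bool :=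
  let line := PySem.Str.strip rawLine
  if PySem.Str.startswith line "```" then (st.1, st.2.1, !st.2.2)
  else if st.2.2 then st
  else if PySem.Str.startswith line "#" then
    ((if st.2.1 ≠ [] then st.1 ++ st.2.1.take 3 else st.1), [line], st.2.2)
  else if (!(line == "")) && !(PySem.Str.startswith line "*") && !(PySem.Str.startswith line "-") then
    (st.1, st.2.1 ++ [line], st.2.2)
  else st

def extract_markdown_summary_py (content : String) : String :=
  let lines := (PySem.Str.split? content "\n").getD []
  let st := lines.foldl pvStepA ([], [], false)
  let summary_parts := if st.2.1 ≠ [] then st.1 ++ st.2.1.take 3 else st.1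
  PySem.Str.join " " summary_parts

-- ===== PORT B =====
-- pass 1 loop body: classify kept lines as header/content tokens (state: tokens, in_code_block)
def pvStepCls (st : List (Bool × String) × Bool) (raw : String) : List (Bool × String) × Bool :=
  let line := PySem.Str.strip raw
  if PySem.Str.startswith line "```" then (st.1, !st.2)
  else if st.2 then st
  else if PySem.Str.startswith line "#" then (st.1 ++ [(true, line)], st.2)
  else if (!(line == "")) && !(PySem.Str.startswith line "*") && !(PySem.Str.startswith line "-") then
    (st.1 ++ [(false, line)], st.2)
  else st

def pvClassify (content : String) : List (Bool × String) :=
  (((PySem.Str.split? content "\n").getD []).foldl pvStepCls ([], false)).1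

-- pass 2 loop body: each header token begins a new section (state: sections, current)
def pvStepSec (st : List (List String) × List String) (tk : Bool × String) :
    List (List String) × List String :=
  if tk.1 then (st.1 ++ [st.2], [tk.2]) else (st.1, st.2 ++ [tk.2])

def pvSplitSections (tokens : List (Bool × String)) : List (List String) :=
  let st := tokens.foldl pvStepSec ([], [])
  st.1 ++ [st.2]

def extract_markdown_summary_py_alt (content : String) : String :=
  PySem.Str.join " " (((pvSplitSections (pvClassify content)).map (·.take 3)).flatten)

-- ===== PRECONDITION & SPEC =====
def Spec_extract_markdown_summary_py (content : String) (out : String) : Prop := out = extract_markdown_summary_py_alt content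
instance (content : String) (out : String) : Decidable (Spec_extract_markdown_summary_py content out) := by unfold Spec_extract_markdown_summary_py; infer_instance

-- ===== CLAIM (what is proved, stated in full; the proofs are below) =====
def Claim_equal_extract_markdown_summary_py : Prop := ∀ (content : String), Dom_extract_markdown_summary_py content → Spec_extract_markdown_summary_py content (extract_markdown_summary_py content)

-- ===== LEMMAS AND PROOFS =====

-- reference token stream: direct recursion equivalent of both loops' skip/keep logic
def pvToks : List String → Bool → List (Bool × String)
  | [], _ => []
  | raw :: rest, code =>
    let line := PySem.Str.strip raw
    if PySem.Str.startswith line "```" then pvToks rest (!code)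
    else if code then pvToks rest code
    else if PySem.Str.startswith line "#" then (true, line) :: pvToks rest code
    else if (!(line == "")) && !(PySem.Str.startswith line "*") && !(PySem.Str.startswith line "-") then
      (false, line) :: pvToks rest code
    else pvToks rest code

-- reference grouping with an open section
def pvGrp : List String → List (Bool × String) → List (List String)
  | cur, [] => [cur]
  | cur, (h, t) :: ts => if h then cur :: pvGrp [t] ts else pvGrp (cur ++ [t]) ts

theorem pvFoldA_spec (lines : List String) :
    ∀ (code : Bool) (parts cur : List String),
    (lines.foldl pvStepA (parts, cur, code)).1 ++ ((lines.foldl pvStepA (parts, cur, code)).2.1).take 3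
      = parts ++ ((pvGrp cur (pvToks lines code)).map (·.take 3)).flatten := by
  induction lines with
  | nil => intro code parts cur; simp [pvToks, pvGrp]
  | cons raw rest ih =>
    intro code parts cur
    simp only [List.foldl_cons, pvStepA, pvToks]
    split_ifs with h1 h2 h3 h4 h5
    · exact ih (!code) parts cur
    · exact ih code parts cur
    · -- header, cur ≠ []
      rw [ih code (parts ++ cur.take 3) [PySem.Str.strip raw]]
      simp [pvGrp]
    · -- header, cur = []
      rw [ih code parts [PySem.Str.strip raw]]
      simp_all [pvGrp]
    · rw [ih code parts (cur ++ [PySem.Str.strip raw])]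
      simp [pvGrp]
    · exact ih code parts cur

theorem pvFoldCls_spec (lines : List String) :
    ∀ (code : Bool) (acc : List (Bool × String)),
    (lines.foldl pvStepCls (acc, code)).1 = acc ++ pvToks lines code := by
  induction lines with
  | nil => intro code acc; simp [pvToks]
  | cons raw rest ih =>
    intro code acc
    simp only [List.foldl_cons, pvStepCls, pvToks]
    split_ifs with h1 h2 h3 h4
    · exact ih (!code) acc
    · exact ih code acc
    · rw [ih code (acc ++ [(true, PySem.Str.strip raw)])]; simp
    · rw [ih code (acc ++ [(false, PySem.Str.strip raw)])]; simp
    · exact ih code acc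

theorem pvFoldSec_spec (ts : List (Bool × String)) :
    ∀ (secs : List (List String)) (cur : List String),
    (ts.foldl pvStepSec (secs, cur)).1 ++ [(ts.foldl pvStepSec (secs, cur)).2]
      = secs ++ pvGrp cur ts := by
  induction ts with
  | nil => intro secs cur; simp [pvGrp]
  | cons tk rest ih =>
    intro secs cur
    obtain ⟨h, t⟩ := tk
    simp only [List.foldl_cons, pvStepSec, pvGrp]
    split_ifs with hh
    · rw [ih (secs ++ [cur]) [t]]; simp
    · rw [ih secs (cur ++ [t])]

-- ===== VERDICT (by name: the statement is the Claim_ definition above) =====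
theorem extract_markdown_summary_py_spec : Claim_equal_extract_markdown_summary_py := by
  intro content _
  unfold Spec_extract_markdown_summary_py extract_markdown_summary_py extract_markdown_summary_py_alt
  unfold pvClassify pvSplitSections
  rw [pvFoldCls_spec, pvFoldSec_spec]
  simp only [List.nil_append]
  split_ifs with h
  · congr 1
    exact pvFoldA_spec _ false [] []
  · rw [not_ne_iff] at h
    have := pvFoldA_spec ((PySem.Str.split? content "\n").getD []) false [] []
    rw [h] at this
    simp only [List.take_nil, List.append_nil] at this
    rw [this]
    simp
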